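-- pv_equiv track=rewrite | github.com/EugeniuZ/Advent-of-Code-2024 | 07/solution.py | check_eq_ext
-- ===== SOURCE A (Python) =====
-- def check_eq_ext(ns, tv, cv, ops):
--     if cv == tv:
--         return ops
--     if cv > tv:
--         return
--     if not ns:
--         return
--     op = ns[0]
--     return (
--         check_eq_ext(ns[1:], tv, int(f'{cv}{op}'), ops + f'||{op}')
--         or check_eq_ext(ns[1:], tv, cv * op, ops + f'*{op}' )
--         or check_eq_ext(ns[1:], tv, cv + op, ops + f'+{op}')
--     )
-- ===== SOURCE B (Python) =====
-- def check_eq_ext(ns, tv, cv, ops):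
--     stack = [(ns, cv, ops)]
--     while stack:
--         ns_, cv_, ops_ = stack.pop()
--         if cv_ == tv:
--             return ops_
--         if cv_ > tv or not ns_:
--             continue
--         op = ns_[0]
--         rest = ns_[1:]
--         stack.append((rest, cv_ + op, ops_ + f'+{op}'))
--         stack.append((rest, cv_ * op, ops_ + f'*{op}'))
--         stack.append((rest, int(f'{cv_}{op}'), ops_ + f'||{op}'))
--     return None
-- ===== Notes on version B (the rewrite author's own statement) =====
-- stated objective: alternative
-- what changed: Replaces the three-way 'or'-chained recursion by an explicit stack-based iterative DFS that pushes the three successor states in reverse priority order, preserving the exact first-found result.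
-- outside the precondition, e.g. on check_eq_ext([2, -1], 12, 1, ''): A returns '||2', B returns '||2'
import Mathlib
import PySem

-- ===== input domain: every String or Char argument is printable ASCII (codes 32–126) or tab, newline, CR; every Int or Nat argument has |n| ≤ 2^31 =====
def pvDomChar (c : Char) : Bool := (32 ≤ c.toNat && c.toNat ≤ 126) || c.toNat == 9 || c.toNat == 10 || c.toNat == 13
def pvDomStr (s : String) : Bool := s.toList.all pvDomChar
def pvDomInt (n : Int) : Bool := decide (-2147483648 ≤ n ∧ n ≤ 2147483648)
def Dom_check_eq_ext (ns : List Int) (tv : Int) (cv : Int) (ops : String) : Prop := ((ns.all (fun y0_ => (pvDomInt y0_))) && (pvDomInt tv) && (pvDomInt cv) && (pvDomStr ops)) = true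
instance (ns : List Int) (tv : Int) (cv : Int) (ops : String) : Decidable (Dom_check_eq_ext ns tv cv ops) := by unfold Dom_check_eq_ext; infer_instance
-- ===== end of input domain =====

-- B replaces A's 'or'-chained triple recursion by an explicit stack-based iterative DFS
-- (same successor order, same pruning, same first-found answer); no speed claim.

-- ===== PORT A =====

-- Python's `x or y` on values that are str-or-None: '' and None are falsy.
def pyOrStr (a : Option String) (b : Unit → Option String) : Option String :=
  match a with
  | none => b ()
  | some s => if s = "" then b () else some s

-- int(f'{cv}{op}'); parsing fails (Python ValueError) only when op < 0, which Pre_ excludes: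
-- the .getD 0 branch is unreachable inside Pre_.
def pvConcat (cv op : Int) : Int :=
  (PySem.Int.ofStr? (PySem.Int.toStr cv ++ PySem.Int.toStr op)).getD 0

def check_eq_ext (ns : List Int) (tv : Int) (cv : Int) (ops : String) : Option String :=
  if cv = tv then some ops
  else if cv > tv then none
  else
    match ns with
    | [] => none
    | op :: rest =>
      pyOrStr (check_eq_ext rest tv (pvConcat cv op) (ops ++ "||" ++ PySem.Int.toStr op))
        (fun _ => pyOrStr (check_eq_ext rest tv (cv * op) (ops ++ "*" ++ PySem.Int.toStr op))
          (fun _ => check_eq_ext rest tv (cv + op) (ops ++ "+" ++ PySem.Int.toStr op)))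

-- ===== PORT B =====

def pvStkMeasure (st : List (List Int × Int × String)) : Nat :=
  (st.map (fun s => 4 ^ s.1.length)).sum

-- cited by pvRunStack's decreasing_by
theorem pv4pow_pos (n : Nat) : 0 < 4 ^ n := Nat.pow_pos (by norm_num)

-- the while-loop of B: pop a state, check, push the three successors (|| on top)
def pvRunStack (tv : Int) (st : List (List Int × Int × String)) : Option String :=
  match st with
  | [] => none
  | (ns_, cv_, ops_) :: rest =>
    if cv_ = tv then some ops_
    else if cv_ > tv then pvRunStack tv rest
    else
      match ns_ with
      | [] => pvRunStack tv rest
      | op :: tl =>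
        pvRunStack tv ((tl, pvConcat cv_ op, ops_ ++ "||" ++ PySem.Int.toStr op) ::
                       (tl, cv_ * op, ops_ ++ "*" ++ PySem.Int.toStr op) ::
                       (tl, cv_ + op, ops_ ++ "+" ++ PySem.Int.toStr op) :: rest)
termination_by pvStkMeasure st
decreasing_by
  all_goals simp [pvStkMeasure, pow_succ]
  have h4 := pv4pow_pos tl.length
  omega

def check_eq_ext_alt (ns : List Int) (tv : Int) (cv : Int) (ops : String) : Option String :=
  pvRunStack tv [(ns, cv, ops)]

-- ===== PRECONDITION & SPEC =====
-- Pre_ excludes inputs whose number list contains a negative element (unless the search is cut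
-- off immediately): there int(f'{cv}{op}') raises ValueError in both A and B whenever the search
-- reaches that element; on a few such inputs A still returns first (one is cited in the claim),
-- so this exclusion is slightly conservative.
def Pre_check_eq_ext (ns : List Int) (tv : Int) (cv : Int) (ops : String) : Prop :=
  cv = tv ∨ tv < cv ∨ ns = [] ∨ ∀ n ∈ ns, 0 ≤ n
instance (ns : List Int) (tv : Int) (cv : Int) (ops : String) : Decidable (Pre_check_eq_ext ns tv cv ops) := by unfold Pre_check_eq_ext; infer_instance

def pvWitness_check_eq_ext : List Int × Int × Int × String := ([2, 3], 23, 2, "")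

def Spec_check_eq_ext (ns : List Int) (tv : Int) (cv : Int) (ops : String) (out : Option String) : Prop := out = check_eq_ext_alt ns tv cv ops
instance (ns : List Int) (tv : Int) (cv : Int) (ops : String) (out : Option String) : Decidable (Spec_check_eq_ext ns tv cv ops out) := by unfold Spec_check_eq_ext; infer_instance

-- ===== CLAIM (what is proved, stated in full; the proofs are below) =====
def Claim_equal_check_eq_ext : Prop := ∀ (ns : List Int) (tv : Int) (cv : Int) (ops : String), Dom_check_eq_ext ns tv cv ops → Pre_check_eq_ext ns tv cv ops → Spec_check_eq_ext ns tv cv ops (check_eq_ext ns tv cv ops)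

-- ===== LEMMAS AND PROOFS =====

-- Python's `or` on a non-empty string short-circuits
theorem pyOrStr_some_ne (s : String) (hs : s ≠ "") (b : Unit → Option String) :
    pyOrStr (some s) b = some s := by simp [pyOrStr, hs]

-- any answer A returns carries the accumulated ops string, hence is at least as long
theorem pyOrStr_eq_some (a : Option String) (b : Unit → Option String) (s : String)
    (hab : pyOrStr a b = some s) : a = some s ∨ b () = some s := by
  cases a with
  | none => exact Or.inr hab
  | some t =>
    simp only [pyOrStr] at hab
    split_ifs at hab with ht
    · exact Or.inr hab
    · exact Or.inl hab

-- any answer A returns carries the accumulated ops string, hence is at least as long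
theorem check_eq_ext_len (tv : Int) (ns : List Int) :
    ∀ (cv : Int) (ops s : String), check_eq_ext ns tv cv ops = some s → ops.length ≤ s.length := by
  induction ns with
  | nil =>
    intro cv ops s h
    by_cases h1 : cv = tv
    · simp [check_eq_ext, h1] at h
      rw [h]
    · by_cases h2 : cv > tv <;> simp [check_eq_ext, h1, h2] at h
  | cons op rest ih =>
    intro cv ops s h
    by_cases h1 : cv = tv
    · simp [check_eq_ext, h1] at h
      rw [h]
    · by_cases h2 : cv > tv
      · simp [check_eq_ext, h1, h2] at h
      · simp only [check_eq_ext, if_neg h1, if_neg h2] at h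
        rcases pyOrStr_eq_some _ _ _ h with hA | h'
        · have := ih (pvConcat cv op) _ s hA
          simp only [String.length_append] at this
          omega
        · rcases pyOrStr_eq_some _ _ _ h' with hB | h''
          · have := ih (cv * op) _ s hB
            simp only [String.length_append] at this
            omega
          · have := ih (cv + op) _ s h''
            simp only [String.length_append] at this
            omega

theorem check_eq_ext_ne_empty (tv : Int) (ns : List Int) (cv : Int) (ops s : String)
    (hops : ops.length ≠ 0) (h : check_eq_ext ns tv cv ops = some s) : s ≠ "" := by
  intro hs
  subst hs
  have hlen := check_eq_ext_len tv ns cv ops "" h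
  have h0 : ("" : String).length = 0 := rfl
  omega

-- running the stack machine on a pushed state = A's result there, falling back to the rest
theorem pvRunStack_cons (tv : Int) (ns : List Int) :
    ∀ (cv : Int) (ops : String) (rest : List (List Int × Int × String)),
      pvRunStack tv ((ns, cv, ops) :: rest) =
        match check_eq_ext ns tv cv ops with
        | some s => some s
        | none => pvRunStack tv rest := by
  induction ns with
  | nil =>
    intro cv ops rest
    rw [pvRunStack]
    by_cases h1 : cv = tv
    · simp [check_eq_ext, h1]
    · by_cases h2 : cv > tv <;> simp [check_eq_ext, h1, h2]
  | cons op tl ih =>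
    intro cv ops rest
    rw [pvRunStack]
    by_cases h1 : cv = tv
    · simp [check_eq_ext, h1]
    · by_cases h2 : cv > tv
      · simp [check_eq_ext, h1, h2]
      · simp only [check_eq_ext, if_neg h1, if_neg h2]
        rw [ih, ih, ih]
        rcases hc : check_eq_ext tl tv (pvConcat cv op) (ops ++ "||" ++ PySem.Int.toStr op) with _ | s1
        · simp only [pyOrStr]
          rcases hm : check_eq_ext tl tv (cv * op) (ops ++ "*" ++ PySem.Int.toStr op) with _ | s2
          · simp
          · have hne : s2 ≠ "" :=
              check_eq_ext_ne_empty tv tl _ _ s2 (by simp [String.length_append]) hm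
            simp [hne]
        · have hne : s1 ≠ "" :=
            check_eq_ext_ne_empty tv tl _ _ s1 (by simp [String.length_append]) hc
          rw [pyOrStr_some_ne s1 hne]

-- ===== VERDICT (by name: the statement is the Claim_ definition above) =====
theorem check_eq_ext_spec : Claim_equal_check_eq_ext := by
  intro ns tv cv ops _ _
  unfold Spec_check_eq_ext check_eq_ext_alt
  rw [pvRunStack_cons]
  rcases h : check_eq_ext ns tv cv ops with _ | s
  · rw [pvRunStack]
  · rfl
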